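-- pv_equiv track=rewrite | github.com/Flipajs/FERDA | scripts/colleditor/editable_pixmap.py | nearest_free_neighbour
-- ===== SOURCE A (Python) =====
-- import math
--
-- def nearest_free_neighbour(pts, pt):
--     """Searches eight neighbours of pt in pts, picks
--     nearest free (missing in pts) pt if exists, else
--     returns None
--     """
--     x = int(pt[0])
--     y = int(pt[1])
--     free = []
--     for x_i in range(x - 1, x + 1 + 1):  # range(0, 2) -> [0, 1]
--         for y_i in range(y - 1, y + 1 + 1):
--             if [x_i, y_i] not in pts:
--                 free.append([[x_i, y_i], math.hypot(x-x_i, y-y_i)])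
--
--     best_pt = None
--     best_d = 10
--
--     for f in free:
--         if f[1] < best_d:
--             best_pt = f[0]
--
--     return best_pt
-- ===== SOURCE B (Python) =====
-- def nearest_free_neighbour(pts, pt):
--     """Scans the 3x3 neighbourhood of pt and returns the last cell
--     (in scan order) that is missing from pts, or None.
--
--     (A's distance bookkeeping never filters anything -- every neighbour
--     distance is < 10 -- so the result is simply the last free cell.)
--     """
--     x = int(pt[0])
--     y = int(pt[1])
--     result = None
--     for x_i in range(x - 1, x + 2):
--         for y_i in range(y - 1, y + 2):
--             if [x_i, y_i] not in pts:
--                 result = [x_i, y_i]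
--     return result
-- ===== Notes on version B (the rewrite author's own statement) =====
-- stated objective: simpler
-- what changed: B drops A's intermediate free-list and all distance computation (which never filters anything, since every neighbour distance is below the 10 threshold) and keeps just one 'last free cell' variable in a single pass over the 9 cells.
-- outside the precondition, e.g. on nearest_free_neighbour([], []): A raises IndexError, B raises IndexError
import Mathlib
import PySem

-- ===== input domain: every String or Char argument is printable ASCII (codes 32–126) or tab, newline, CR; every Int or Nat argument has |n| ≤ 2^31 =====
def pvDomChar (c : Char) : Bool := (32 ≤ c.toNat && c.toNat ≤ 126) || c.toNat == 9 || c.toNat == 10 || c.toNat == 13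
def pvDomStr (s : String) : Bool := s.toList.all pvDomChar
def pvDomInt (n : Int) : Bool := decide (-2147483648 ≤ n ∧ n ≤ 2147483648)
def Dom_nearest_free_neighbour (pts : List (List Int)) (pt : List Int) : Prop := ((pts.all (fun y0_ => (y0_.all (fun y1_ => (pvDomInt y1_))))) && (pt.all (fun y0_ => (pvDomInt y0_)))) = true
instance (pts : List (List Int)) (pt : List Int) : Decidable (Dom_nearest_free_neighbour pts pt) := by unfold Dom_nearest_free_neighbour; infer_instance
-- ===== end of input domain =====

-- B replaces A's free-list + distance bookkeeping (which never filters anything) by a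
-- single 'last free cell' variable over the same scan; objective: simpler.

-- ===== PORT A =====
-- math.hypot(dx,dy) < 10 is ported exactly as dx*dx + dy*dy < 100 (dx,dy ∈ {-1,0,1} here,
-- and both comparisons are exact on integers of this size).
def nearest_free_neighbour (pts : List (List Int)) (pt : List Int) : Option (List Int) :=
  match PySem.List.pyGet? pt 0, PySem.List.pyGet? pt 1 with
  | some x, some y =>
    let free : List (List Int × Int) :=
      (PySem.List.pyRange (x - 1) (x + 1 + 1) 1).foldl (fun acc x_i =>
        (PySem.List.pyRange (y - 1) (y + 1 + 1) 1).foldl (fun acc y_i =>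
          if [x_i, y_i] ∉ pts then
            acc ++ [([x_i, y_i], (x - x_i) * (x - x_i) + (y - y_i) * (y - y_i))]
          else acc) acc) []
    free.foldl (fun best_pt f => if f.2 < 100 then some f.1 else best_pt) none
  | _, _ => none

-- ===== PORT B =====
def nearest_free_neighbour_alt (pts : List (List Int)) (pt : List Int) : Option (List Int) :=
  match PySem.List.pyGet? pt 0 with
  | none => none
  | some x =>
  match PySem.List.pyGet? pt 1 with
  | none => none
  | some y =>
    (PySem.List.pyRange (x - 1) (x + 2) 1).foldl (fun result x_i =>
      (PySem.List.pyRange (y - 1) (y + 2) 1).foldl (fun result y_i =>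
        if [x_i, y_i] ∉ pts then some [x_i, y_i] else result) result) none

-- ===== PRECONDITION & SPEC =====
-- A raises IndexError (pt[0] / pt[1]) when pt has fewer than two elements.
def Pre_nearest_free_neighbour (pts : List (List Int)) (pt : List Int) : Prop := 2 ≤ pt.length
instance (pts : List (List Int)) (pt : List Int) : Decidable (Pre_nearest_free_neighbour pts pt) := by unfold Pre_nearest_free_neighbour; infer_instance
def pvWitness_nearest_free_neighbour : List (List Int) × List Int := ([[0, 0]], [0, 1])

def Spec_nearest_free_neighbour (pts : List (List Int)) (pt : List Int) (out : Option (List Int)) : Prop := out = nearest_free_neighbour_alt pts pt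
instance (pts : List (List Int)) (pt : List Int) (out : Option (List Int)) : Decidable (Spec_nearest_free_neighbour pts pt out) := by unfold Spec_nearest_free_neighbour; infer_instance

-- ===== CLAIM (what is proved, stated in full; the proofs are below) =====
def Claim_equal_nearest_free_neighbour : Prop := ∀ (pts : List (List Int)) (pt : List Int), Dom_nearest_free_neighbour pts pt → Pre_nearest_free_neighbour pts pt → Spec_nearest_free_neighbour pts pt (nearest_free_neighbour pts pt)

-- ===== LEMMAS AND PROOFS =====

lemma pyRange_expand3 (a : Int) : PySem.List.pyRange (a - 1) (a + 2) 1 = [a - 1, a, a + 1] := by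
  rw [PySem.List.pyRange_one_cons (by omega), PySem.List.pyRange_one_cons (by omega),
      PySem.List.pyRange_one_cons (by omega), PySem.List.pyRange_one_eq_nil (by omega)]
  norm_num

-- selecting over (acc ++ one free cell of weight < 100) picks that cell
lemma selLast_step (pts : List (List Int)) (c : List Int) (w : Int) (acc : List (List Int × Int))
    (hw : w < 100) :
    List.foldl (fun best_pt f => if f.2 < 100 then some f.1 else best_pt) none
      (if c ∉ pts then acc ++ [(c, w)] else acc)
    = if c ∉ pts then some c
      else List.foldl (fun best_pt f => if f.2 < 100 then some f.1 else best_pt) none acc := by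
  split_ifs with h
  · rfl
  · rw [List.foldl_append]; simp [hw]

-- ===== VERDICT (by name: the statement is the Claim_ definition above) =====
theorem nearest_free_neighbour_spec : Claim_equal_nearest_free_neighbour := by
  intro pts pt _ hpre
  unfold Spec_nearest_free_neighbour nearest_free_neighbour nearest_free_neighbour_alt
  unfold Pre_nearest_free_neighbour at hpre
  match pt, hpre with
  | x :: y :: rest, _ =>
    have h0 : PySem.List.pyGet? (x :: y :: rest) 0 = some x := by simp [pysem]
    have h1 : PySem.List.pyGet? (x :: y :: rest) 1 = some y := by
      simp [PySem.List.pyGet?, PySem.List.pyIdx?]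
    rw [h0, h1]
    dsimp only
    have ex : x + 1 + 1 = x + 2 := by ring
    have ey : y + 1 + 1 = y + 2 := by ring
    rw [ex, ey, pyRange_expand3, pyRange_expand3]
    simp only [List.foldl]
    rw [selLast_step pts _ _ _ (by nlinarith), selLast_step pts _ _ _ (by nlinarith),
        selLast_step pts _ _ _ (by nlinarith), selLast_step pts _ _ _ (by nlinarith),
        selLast_step pts _ _ _ (by nlinarith), selLast_step pts _ _ _ (by nlinarith),
        selLast_step pts _ _ _ (by nlinarith), selLast_step pts _ _ _ (by nlinarith),
        selLast_step pts _ _ _ (by nlinarith)]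
    simp only [List.foldl_nil]
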